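-- pv_equiv track=rewrite | github.com/Jaime-alv/codewars.com | 6 kyu/Multi-tap Keypad Text Entry on an Old Mobile Phone.py | presses
-- ===== SOURCE A (Python) =====
-- keyboard = {1: ['1'],
--             2: ['a', 'b', 'c', '2'],
--             3: ['d', 'e', 'f', '3'],
--             4: ['g', 'h', 'i', '4'],
--             5: ['j', 'k', 'l', '5'],
--             6: ['m', 'n', 'o', '6'],
--             7: ['p', 'q', 'r', 's', '7'],
--             8: ['t', 'u', 'v', '8'],
--             9: ['w', 'x', 'y', 'z', '9'],
--             0: [' ', '0'],
--             '*': ['*'],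
--             '#': ['#']}
--
-- def presses(phrase):
--     number_pressed = 0
--     # given_string = list(phrase.lower())
--     for character in phrase.lower():
--         for letter in keyboard:
--             if character in keyboard[letter]:
--                 for ind in range(len(keyboard[letter])):
--                     if character == keyboard[letter][ind]:
--                         number_pressed += (ind + 1)
--     return number_pressed
-- ===== SOURCE B (Python) =====
-- # closed-form arithmetic on character codes; no keyboard table at all
-- def _press(c):
--     o = ord(c)
--     if ord('a') <= o <= ord('z'):
--         k = o - ord('a')
--         if k < 15:          # abc def ghi jkl mno: groups of 3
--             return k % 3 + 1
--         if k < 19:          # pqrs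
--             return k - 14
--         if k < 22:          # tuv
--             return k - 18
--         return k - 21       # wxyz
--     if ord('2') <= o <= ord('9'):   # digit is last on its key
--         return 5 if o in (ord('7'), ord('9')) else 4
--     if o in (ord(' '), ord('1'), ord('*'), ord('#')):
--         return 1
--     if o == ord('0'):
--         return 2
--     return 0                # not on the keypad
--
-- def presses(phrase):
--     return sum(map(_press, phrase.lower()))
-- ===== Notes on version B (the rewrite author's own statement) =====
-- stated objective: faster
-- what changed: Replaced the per-character nested scan over the keyboard dict with a closed-form arithmetic formula on the character code (group position via subtraction and mod 3), eliminating the keyboard data structure entirely.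
import Mathlib
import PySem

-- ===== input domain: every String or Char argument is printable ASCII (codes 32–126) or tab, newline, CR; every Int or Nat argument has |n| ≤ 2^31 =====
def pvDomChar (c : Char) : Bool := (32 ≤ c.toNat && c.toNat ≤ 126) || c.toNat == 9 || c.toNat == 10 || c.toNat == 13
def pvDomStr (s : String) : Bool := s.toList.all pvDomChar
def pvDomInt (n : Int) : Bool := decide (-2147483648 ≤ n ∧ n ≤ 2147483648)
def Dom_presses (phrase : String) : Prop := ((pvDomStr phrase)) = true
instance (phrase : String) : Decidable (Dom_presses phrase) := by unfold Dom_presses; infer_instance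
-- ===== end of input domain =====

-- B replaces A's per-character nested scan of the keyboard dict with a closed-form
-- arithmetic formula on the character code (objective: faster by a constant factor; no table or scan).

-- ===== PORT A =====
-- The Python `keyboard` dict is only ever read as `keyboard[letter]` while iterating
-- its keys in insertion order, so it is ported (exactly) as its list of values in
-- insertion order; the mixed int/str keys never influence the computation.
def pvKeyboard : List (List Char) :=
  [['1'], ['a', 'b', 'c', '2'], ['d', 'e', 'f', '3'], ['g', 'h', 'i', '4'],
   ['j', 'k', 'l', '5'], ['m', 'n', 'o', '6'], ['p', 'q', 'r', 's', '7'],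
   ['t', 'u', 'v', '8'], ['w', 'x', 'y', 'z', '9'], [' ', '0'], ['*'], ['#']]

-- A's innermost loop: for ind in range(len(ks)): if character == ks[ind]: acc += ind + 1
def pvInnerA (character : Char) (ks : List Char) (acc : Int) : Int :=
  (PySem.List.pyRange 0 (PySem.List.len ks) 1).foldl
    (fun a ind => if character = PySem.List.pyGetD ks ind ' ' then a + (ind + 1) else a) acc

def presses (phrase : String) : Int :=
  (PySem.Str.lower phrase).toList.foldl
    (fun acc character =>
      pvKeyboard.foldl
        (fun a ks => if character ∈ ks then pvInnerA character ks a else a) acc)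
    0

-- ===== PORT B =====
-- Source B's _press: Python chained char-code comparisons and arithmetic, written over
-- c.toNat (= ord(c)); all intermediate values are nonnegative, so Nat arithmetic is exact.
def pvPress (c : Char) : Int :=
  if 97 ≤ c.toNat ∧ c.toNat ≤ 122 then        -- 'a' <= c <= 'z'; o-97 = k inlined
    if c.toNat - 97 < 15 then Int.ofNat ((c.toNat - 97) % 3 + 1)
    else if c.toNat - 97 < 19 then Int.ofNat (c.toNat - 97 - 14)
    else if c.toNat - 97 < 22 then Int.ofNat (c.toNat - 97 - 18)
    else Int.ofNat (c.toNat - 97 - 21)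
  else if 50 ≤ c.toNat ∧ c.toNat ≤ 57 then    -- '2' <= c <= '9'
    (if c.toNat = 55 ∨ c.toNat = 57 then 5 else 4)
  else if c.toNat = 32 ∨ c.toNat = 49 ∨ c.toNat = 42 ∨ c.toNat = 35 then 1   -- ' ','1','*','#'
  else if c.toNat = 48 then 2           -- '0'
  else 0

def presses_alt (phrase : String) : Int :=
  ((PySem.Str.lower phrase).toList.map pvPress).sum

-- ===== PRECONDITION & SPEC =====
def Spec_presses (phrase : String) (out : Int) : Prop := out = presses_alt phrase
instance (phrase : String) (out : Int) : Decidable (Spec_presses phrase out) := by unfold Spec_presses; infer_instance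

-- ===== CLAIM (what is proved, stated in full; the proofs are below) =====
def Claim_equal_presses : Prop := ∀ (phrase : String), Dom_presses phrase → Spec_presses phrase (presses phrase)

-- ===== LEMMAS AND PROOFS =====

-- A's per-character contribution, written as a sum
def pvInnerSum (c : Char) (ks : List Char) : Int :=
  ((PySem.List.pyRange 0 (PySem.List.len ks) 1).map
    (fun ind => if c = PySem.List.pyGetD ks ind ' ' then ind + 1 else 0)).sum

def pvCharA (c : Char) : Int :=
  (pvKeyboard.map (fun ks => if c ∈ ks then pvInnerSum c ks else 0)).sum

theorem pvInnerA_eq (c : Char) (ks : List Char) (a : Int) :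
    pvInnerA c ks a = a + pvInnerSum c ks := by
  unfold pvInnerA pvInnerSum
  have h : (fun (a : Int) ind =>
      if c = PySem.List.pyGetD ks ind ' ' then a + (ind + 1) else a)
      = fun a ind => a + (if c = PySem.List.pyGetD ks ind ' ' then ind + 1 else 0) := by
    funext a i; split <;> simp
  rw [h, PySem.List.foldl_add]

theorem pvOuterA_eq (c : Char) (a : Int) :
    pvKeyboard.foldl (fun a ks => if c ∈ ks then pvInnerA c ks a else a) a
      = a + pvCharA c := by
  unfold pvCharA
  have h : (fun (a : Int) ks => if c ∈ ks then pvInnerA c ks a else a)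
      = fun a ks => a + (if c ∈ ks then pvInnerSum c ks else 0) := by
    funext a ks; split
    · exact pvInnerA_eq c ks a
    · simp
  rw [h, PySem.List.foldl_add]

theorem pvChar_eq_of_toNat (c d : Char) (h : c.toNat = d.toNat) : c = d := by
  apply Char.ext
  exact UInt32.toNat_inj.mp h

set_option maxRecDepth 8192 in
theorem pvCharA_eq_press (c : Char) : pvCharA c = pvPress c := by
  by_cases hc : c ∈ ['1','a','b','c','2','d','e','f','3','g','h','i','4','j','k','l','5',
      'm','n','o','6','p','q','r','s','7','t','u','v','8','w','x','y','z','9',' ','0','*','#']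
  · fin_cases hc <;> decide
  · simp only [List.mem_cons, List.not_mem_nil, or_false] at hc
    push Not at hc
    obtain ⟨h1,h2,h3,h4,h5,h6,h7,h8,h9,h10,h11,h12,h13,h14,h15,h16,h17,h18,h19,h20,
      h21,h22,h23,h24,h25,h26,h27,h28,h29,h30,h31,h32,h33,h34,h35,h36,h37,h38,h39⟩ := hc
    have hA : pvCharA c = 0 := by
      simp [pvCharA, pvKeyboard, pvInnerSum,
        h1,h2,h3,h4,h5,h6,h7,h8,h9,h10,h11,h12,h13,h14,h15,h16,h17,h18,h19,h20,h21,h22,h23,h24,h25,h26,h27,h28,h29,h30,h31,h32,h33,h34,h35,h36,h37,h38,h39,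
        Ne.symm h1, Ne.symm h2, Ne.symm h3, Ne.symm h4, Ne.symm h5, Ne.symm h6, Ne.symm h7, Ne.symm h8, Ne.symm h9, Ne.symm h10, Ne.symm h11, Ne.symm h12, Ne.symm h13, Ne.symm h14, Ne.symm h15, Ne.symm h16, Ne.symm h17, Ne.symm h18, Ne.symm h19, Ne.symm h20, Ne.symm h21, Ne.symm h22, Ne.symm h23, Ne.symm h24, Ne.symm h25, Ne.symm h26, Ne.symm h27, Ne.symm h28, Ne.symm h29, Ne.symm h30, Ne.symm h31, Ne.symm h32, Ne.symm h33, Ne.symm h34, Ne.symm h35, Ne.symm h36, Ne.symm h37, Ne.symm h38, Ne.symm h39]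
    have tne : ∀ d : Char, c ≠ d → c.toNat ≠ d.toNat :=
      fun d hne h => hne (pvChar_eq_of_toNat c d h)
    have n1 : c.toNat ≠ 49 := tne _ h1
    have n2 : c.toNat ≠ 97 := tne _ h2
    have n3 : c.toNat ≠ 98 := tne _ h3
    have n4 : c.toNat ≠ 99 := tne _ h4
    have n5 : c.toNat ≠ 50 := tne _ h5
    have n6 : c.toNat ≠ 100 := tne _ h6
    have n7 : c.toNat ≠ 101 := tne _ h7
    have n8 : c.toNat ≠ 102 := tne _ h8
    have n9 : c.toNat ≠ 51 := tne _ h9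
    have n10 : c.toNat ≠ 103 := tne _ h10
    have n11 : c.toNat ≠ 104 := tne _ h11
    have n12 : c.toNat ≠ 105 := tne _ h12
    have n13 : c.toNat ≠ 52 := tne _ h13
    have n14 : c.toNat ≠ 106 := tne _ h14
    have n15 : c.toNat ≠ 107 := tne _ h15
    have n16 : c.toNat ≠ 108 := tne _ h16
    have n17 : c.toNat ≠ 53 := tne _ h17
    have n18 : c.toNat ≠ 109 := tne _ h18
    have n19 : c.toNat ≠ 110 := tne _ h19
    have n20 : c.toNat ≠ 111 := tne _ h20
    have n21 : c.toNat ≠ 54 := tne _ h21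
    have n22 : c.toNat ≠ 112 := tne _ h22
    have n23 : c.toNat ≠ 113 := tne _ h23
    have n24 : c.toNat ≠ 114 := tne _ h24
    have n25 : c.toNat ≠ 115 := tne _ h25
    have n26 : c.toNat ≠ 55 := tne _ h26
    have n27 : c.toNat ≠ 116 := tne _ h27
    have n28 : c.toNat ≠ 117 := tne _ h28
    have n29 : c.toNat ≠ 118 := tne _ h29
    have n30 : c.toNat ≠ 56 := tne _ h30
    have n31 : c.toNat ≠ 119 := tne _ h31
    have n32 : c.toNat ≠ 120 := tne _ h32
    have n33 : c.toNat ≠ 121 := tne _ h33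
    have n34 : c.toNat ≠ 122 := tne _ h34
    have n35 : c.toNat ≠ 57 := tne _ h35
    have n36 : c.toNat ≠ 32 := tne _ h36
    have n37 : c.toNat ≠ 48 := tne _ h37
    have n38 : c.toNat ≠ 42 := tne _ h38
    have n39 : c.toNat ≠ 35 := tne _ h39
    have hB : pvPress c = 0 := by
      unfold pvPress
      split_ifs <;> omega
    rw [hA, hB]

set_option maxRecDepth 8192 in
theorem presses_eq_sum (phrase : String) :
    presses phrase = ((PySem.Str.lower phrase).toList.map pvCharA).sum := by
  unfold presses
  have h : (fun (acc : Int) character =>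
      pvKeyboard.foldl (fun a ks => if character ∈ ks then pvInnerA character ks a else a) acc)
      = fun acc character => acc + pvCharA character := by
    funext a c; exact pvOuterA_eq c a
  rw [h, PySem.List.foldl_add]
  simp

-- ===== VERDICT (by name: the statement is the Claim_ definition above) =====
set_option maxRecDepth 8192 in
theorem presses_spec : Claim_equal_presses := by
  intro phrase _
  unfold Spec_presses presses_alt
  rw [presses_eq_sum]
  congr 1
  exact List.map_congr_left (fun c _ => pvCharA_eq_press c)
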